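-- pv_equiv track=rewrite | github.com/stephenmesser/mrna-prototype | ivt_rna_qc.py | _estimate_poly_a_length
-- ===== SOURCE A (Python) =====
-- def _estimate_poly_a_length(sequence: str) -> int:
--     """Estimate poly(A) tail length from sequence."""
--     # Look for poly(A) runs at the 3' end
--     reversed_seq = sequence[::-1]
--     poly_a_length = 0
--
--     for base in reversed_seq:
--         if base == 'A':
--             poly_a_length += 1
--         else:
--             break
--
--     return poly_a_length
-- ===== SOURCE B (Python) =====
-- def _estimate_poly_a_length(sequence: str) -> int:
--     """Estimate poly(A) tail length from sequence."""
--     return len(sequence) - len(sequence.rstrip('A'))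
-- ===== Notes on version B (the rewrite author's own statement) =====
-- stated objective: idiomatic
-- what changed: Replaces the reverse-and-count loop with a closed-form expression: strip the maximal trailing run of 'A' with str.rstrip('A') and subtract the remaining length from the original length.
import Mathlib
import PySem

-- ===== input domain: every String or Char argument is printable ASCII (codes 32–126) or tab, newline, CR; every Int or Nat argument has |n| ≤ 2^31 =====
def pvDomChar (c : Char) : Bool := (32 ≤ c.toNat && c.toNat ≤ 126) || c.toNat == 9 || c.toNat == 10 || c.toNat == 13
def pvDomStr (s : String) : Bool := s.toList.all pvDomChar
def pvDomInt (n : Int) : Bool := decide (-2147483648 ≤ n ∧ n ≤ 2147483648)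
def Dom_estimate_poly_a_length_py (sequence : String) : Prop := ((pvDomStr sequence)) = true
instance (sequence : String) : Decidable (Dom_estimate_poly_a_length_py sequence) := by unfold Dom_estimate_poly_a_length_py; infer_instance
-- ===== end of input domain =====

-- B replaces A's reverse-and-count loop by the closed form len(s) - len(s.rstrip('A')) (idiomatic; same cost).

-- ===== PORT A =====
-- the for-loop with break: count leading 'A's of the reversed sequence, stop at the first non-'A'
def pvCountLoop : Int → List Char → Int
  | acc, [] => acc
  | acc, c :: rest => if c == 'A' then pvCountLoop (acc + 1) rest else acc

def estimate_poly_a_length_py (sequence : String) : Int :=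
  -- reversed_seq = sequence[::-1]  (slice? … (-1) = some reverse, cite slice?_none_none_neg_one)
  let reversed_seq := ((PySem.List.slice? sequence.toList none none (-1)).getD [])
  pvCountLoop 0 reversed_seq

-- ===== PORT B =====
-- hand port of str.rstrip('A') (PySem has no rstrip-with-chars): drop the trailing run of 'A';
-- exact, since rstrip('A') removes exactly the maximal trailing run of 'A' characters
def pvRstripA (cs : List Char) : List Char :=
  ((cs.reverse.dropWhile (· == 'A')).reverse)

def estimate_poly_a_length_py_alt (sequence : String) : Int :=
  (sequence.toList.length : Int) - ((pvRstripA sequence.toList).length : Int)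

-- ===== PRECONDITION & SPEC =====
def Spec_estimate_poly_a_length_py (sequence : String) (out : Int) : Prop := out = estimate_poly_a_length_py_alt sequence
instance (sequence : String) (out : Int) : Decidable (Spec_estimate_poly_a_length_py sequence out) := by unfold Spec_estimate_poly_a_length_py; infer_instance

-- ===== CLAIM (what is proved, stated in full; the proofs are below) =====
def Claim_equal_estimate_poly_a_length_py : Prop := ∀ (sequence : String), Dom_estimate_poly_a_length_py sequence → Spec_estimate_poly_a_length_py sequence (estimate_poly_a_length_py sequence)

-- ===== LEMMAS AND PROOFS =====

-- the loop counts the leading run of 'A's, added to the accumulator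
theorem pvCountLoop_eq (acc : Int) (l : List Char) :
    pvCountLoop acc l = acc + (l.takeWhile (· == 'A')).length := by
  induction l generalizing acc with
  | nil => simp [pvCountLoop]
  | cons c rest ih =>
    by_cases h : c = 'A'
    · subst h
      simp [pvCountLoop, List.takeWhile, ih]
      ring
    · simp [pvCountLoop, List.takeWhile, h]
      simp [show (c == 'A') = false by simp [h]]

-- ===== VERDICT (by name: the statement is the Claim_ definition above) =====
theorem estimate_poly_a_length_py_spec : Claim_equal_estimate_poly_a_length_py := by
  intro s _
  unfold Spec_estimate_poly_a_length_py estimate_poly_a_length_py estimate_poly_a_length_py_alt pvRstripA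
  rw [PySem.List.slice?_none_none_neg_one]
  simp only [Option.getD_some]
  rw [pvCountLoop_eq]
  have h : (s.toList.reverse.takeWhile (· == 'A')).length
      + (s.toList.reverse.dropWhile (· == 'A')).length = s.toList.length := by
    rw [← List.length_append, List.takeWhile_append_dropWhile, List.length_reverse]
  simp only [List.length_reverse]
  omega
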